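-- pv_equiv track=rewrite | github.com/will-data/Self-Study-WIL | programmers/KAKAO Previous Tests/Crane Clawing Game.py | solution
-- ===== SOURCE A (Python) =====
-- def solution(board, moves):
--     # At first, make stack of each columns
--     boardStack = [[] for _ in range(len(board[0]))]
--     for row in board[::-1]:
--         # Watch out, column index is subtracted by -1
--         for column, element in enumerate(row):
--             if element != 0:
--                 boardStack[column].append(element)
--     bucketStack = [];
--     exploded = 0;
--     for move in moves:
--         if boardStack[(move - 1)]:
--             pick = boardStack[(move - 1)].pop()
--             if bucketStack:
--                 if bucketStack[-1] == pick:
--                     bucketStack.pop()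
--                     exploded += 2
--                 else:
--                     bucketStack.append(pick)
--             else:
--                 bucketStack.append(pick)
--
--     return exploded
-- ===== SOURCE B (Python) =====
-- def solution(board, moves):
--     # Lazy per-column cursor: scan each column from the top on demand
--     # instead of precomputing per-column stacks. Board is not mutated.
--     width = len(board[0])
--     top = [0] * width
--     bucket = []
--     exploded = 0
--     for move in moves:
--         c = move - 1
--         t = top[c]
--         while t < len(board) and board[t][c] == 0:
--             t += 1
--         if t < len(board):
--             pick = board[t][c]
--             top[c] = t + 1
--             if bucket and bucket[-1] == pick:
--                 bucket.pop()
--                 exploded += 2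
--             else:
--                 bucket.append(pick)
--         else:
--             top[c] = t
--     return exploded
-- ===== Notes on version B (the rewrite author's own statement) =====
-- stated objective: alternative
-- what changed: Replaces A's upfront construction of per-column stacks (reversed board sweep + append) by a lazy per-column cursor array that scans each column top-down past zeros only when that column is actually moved on; work on never-touched columns disappears.
-- outside the precondition, e.g. on solution([[0, 0], [3]], [2]): A returns 0, B raises IndexError
import Mathlib
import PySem

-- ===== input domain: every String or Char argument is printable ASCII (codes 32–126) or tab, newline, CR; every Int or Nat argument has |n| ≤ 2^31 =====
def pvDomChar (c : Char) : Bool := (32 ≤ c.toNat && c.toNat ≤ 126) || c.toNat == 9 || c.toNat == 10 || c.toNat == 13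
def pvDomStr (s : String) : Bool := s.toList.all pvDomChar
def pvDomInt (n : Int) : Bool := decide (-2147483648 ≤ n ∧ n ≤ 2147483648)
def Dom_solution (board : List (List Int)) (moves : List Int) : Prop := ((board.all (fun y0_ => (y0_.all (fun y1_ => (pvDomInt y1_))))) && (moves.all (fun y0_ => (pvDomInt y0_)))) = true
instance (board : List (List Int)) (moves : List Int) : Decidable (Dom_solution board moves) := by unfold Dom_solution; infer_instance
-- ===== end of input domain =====

-- B replaces A's upfront per-column stack construction by a lazy per-column cursor
-- that scans a column past zeros only when it is actually moved on (alternative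
-- decomposition, same results; neither implementation mutates the inputs observably
-- for the caller of the Lean ports — equivalence is about the return value).

-- ===== PORT A =====
-- inner loop body of the stack-building pass (boardStack[column].append(element))
def aBuildRow (sts : List (List Int)) (row : List Int) : List (List Int) :=
  (PySem.List.enumerate row).foldl
    (fun st ce =>
      if ce.2 ≠ 0 then
        PySem.List.pySetD st ce.1 (PySem.List.pyGetD st ce.1 [] ++ [ce.2])
      else st)
    sts

-- one iteration of A's `for move in moves` loop over (boardStack, bucketStack, exploded)
def aStep (st : List (List Int) × List Int × Int) (move : Int) : List (List Int) × List Int × Int :=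
  match st with
  | (sts, bucket, exploded) =>
    let s := PySem.List.pyGetD sts (move - 1) []
    match s.getLast? with
    | none => (sts, bucket, exploded)
    | some pick =>
      let sts' := PySem.List.pySetD sts (move - 1) s.dropLast
      match bucket.getLast? with
      | none => (sts', bucket ++ [pick], exploded)
      | some b =>
        if b = pick then (sts', bucket.dropLast, exploded + 2)
        else (sts', bucket ++ [pick], exploded)

def solution (board : List (List Int)) (moves : List Int) : Int :=
  let stacks0 := List.replicate (PySem.List.pyGetD board 0 []).length ([] : List Int)
  let stacks1 := ((PySem.List.slice? board none none (-1)).getD []).foldl aBuildRow stacks0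
  (moves.foldl aStep (stacks1, ([] : List Int), (0 : Int))).2.2

-- ===== PORT B =====
-- the `while t < len(board) and board[t][c] == 0: t += 1` loop (fuel = len(board) suffices)
def bScan (board : List (List Int)) (c : Int) (t : Int) : Nat → Int
  | 0 => t
  | fuel+1 =>
    if t < (board.length : Int) ∧ PySem.List.pyGetD (PySem.List.pyGetD board t []) c 0 = 0
    then bScan board c (t + 1) fuel else t

-- one iteration of B's `for move in moves` loop over (top, bucket, exploded)
def bStep (board : List (List Int)) (st : List Int × List Int × Int) (move : Int) :
    List Int × List Int × Int :=
  match st with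
  | (top, bucket, exploded) =>
    let c := move - 1
    let t := bScan board c (PySem.List.pyGetD top c 0) board.length
    if t < (board.length : Int) then
      let pick := PySem.List.pyGetD (PySem.List.pyGetD board t []) c 0
      let top' := PySem.List.pySetD top c (t + 1)
      match bucket.getLast? with
      | none => (top', bucket ++ [pick], exploded)
      | some b =>
        if b = pick then (top', bucket.dropLast, exploded + 2)
        else (top', bucket ++ [pick], exploded)
    else (PySem.List.pySetD top c t, bucket, exploded)

def solution_alt (board : List (List Int)) (moves : List Int) : Int :=
  let width := (PySem.List.pyGetD board 0 []).length
  (moves.foldl (bStep board) (List.replicate width (0 : Int), ([] : List Int), (0 : Int))).2.2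

-- ===== PRECONDITION & SPEC =====
-- Pre_ excludes: empty boards and out-of-range moves, on which A raises IndexError;
-- and non-rectangular boards (outside the game's natural domain), on which A may
-- still return while B's lazy column scan raises IndexError on a short row.
def Pre_solution (board : List (List Int)) (moves : List Int) : Prop :=
  board ≠ [] ∧ (∀ row ∈ board, row.length = board.headI.length) ∧
  ∀ m ∈ moves, 1 - (board.headI.length : Int) ≤ m ∧ m ≤ (board.headI.length : Int)

instance (board : List (List Int)) (moves : List Int) : Decidable (Pre_solution board moves) := by
  unfold Pre_solution; infer_instance

def pvWitness_solution : List (List Int) × List Int := ([[0, 3], [1, 3]], [1, 2, 2, 1])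

def Spec_solution (board : List (List Int)) (moves : List Int) (out : Int) : Prop :=
  out = solution_alt board moves
instance (board : List (List Int)) (moves : List Int) (out : Int) :
    Decidable (Spec_solution board moves out) := by unfold Spec_solution; infer_instance

-- ===== CLAIM (what is proved, stated in full; the proofs are below) =====
def Claim_equal_solution : Prop := ∀ (board : List (List Int)) (moves : List Int),
  Dom_solution board moves → Pre_solution board moves →
  Spec_solution board moves (solution board moves)

-- ===== LEMMAS AND PROOFS =====

-- the column of a board, top to bottom (out-of-range cells read as 0)
def colOf (board : List (List Int)) (j : Nat) : List Int :=
  board.map (fun row => row.getD j 0)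

-- Python's normalised index for an in-range (possibly negative) index
def normIdx (i : Int) (n : Nat) : Nat := if 0 ≤ i then i.toNat else n - (-i).toNat

theorem pyIdx?_norm (n : Nat) (i : Int) (h1 : -(n : Int) ≤ i) (h2 : i < n) :
    PySem.List.pyIdx? n i = some (normIdx i n) := by
  simp only [PySem.List.pyIdx?, normIdx]
  split_ifs
  · rfl
  · rfl

theorem normIdx_lt (n : Nat) (i : Int) (h1 : -(n : Int) ≤ i) (h2 : i < n) :
    normIdx i n < n := by
  simp only [normIdx]; split_ifs with ha <;> omega

theorem pyGetD_norm {α : Type} (xs : List α) (i : Int) (d : α)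
    (h1 : -(xs.length : Int) ≤ i) (h2 : i < xs.length) :
    PySem.List.pyGetD xs i d = xs.getD (normIdx i xs.length) d := by
  simp [PySem.List.pyGetD, PySem.List.pyGet?, pyIdx?_norm _ _ h1 h2, List.getD]

theorem pySetD_norm {α : Type} (xs : List α) (i : Int) (v : α)
    (h1 : -(xs.length : Int) ≤ i) (h2 : i < xs.length) :
    PySem.List.pySetD xs i v = xs.set (normIdx i xs.length) v := by
  simp [PySem.List.pySetD, PySem.List.pySet?, pyIdx?_norm _ _ h1 h2]

theorem aBuildRow_aux (row : List Int) (s : Nat) (st : List (List Int))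
    (hs : s + row.length ≤ st.length) :
    ((PySem.List.enumerate row (s : Int)).foldl
      (fun st ce =>
        if ce.2 ≠ 0 then
          PySem.List.pySetD st ce.1 (PySem.List.pyGetD st ce.1 [] ++ [ce.2])
        else st) st).length = st.length ∧
    ∀ j : Nat, ((PySem.List.enumerate row (s : Int)).foldl
      (fun st ce =>
        if ce.2 ≠ 0 then
          PySem.List.pySetD st ce.1 (PySem.List.pyGetD st ce.1 [] ++ [ce.2])
        else st) st).getD j [] =
      st.getD j [] ++
        (if s ≤ j ∧ j < s + row.length ∧ row.getD (j - s) 0 ≠ 0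
         then [row.getD (j - s) 0] else []) := by
  induction row generalizing s st with
  | nil =>
    refine ⟨rfl, fun j => ?_⟩
    rw [PySem.List.enumerate_nil]
    simp only [List.foldl_nil, List.length_nil]
    split
    · exfalso; omega
    · simp
  | cons x xs ih =>
    rw [PySem.List.enumerate_cons, List.foldl_cons]
    have hslt : s < st.length := by simp at hs; omega
    set st' := (if ((s : Int), x).2 ≠ 0 then
        PySem.List.pySetD st ((s : Int), x).1
          (PySem.List.pyGetD st ((s : Int), x).1 [] ++ [((s : Int), x).2])
      else st) with hst'
    have hlen' : st'.length = st.length := by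
      rw [hst']; split
      · simp [PySem.List.pySetD, PySem.List.pySet?, PySem.List.pyIdx?]
        split <;> simp
      · rfl
    have hget' : ∀ j : Nat, st'.getD j [] =
        if j = s ∧ x ≠ 0 then st.getD s [] ++ [x] else st.getD j [] := by
      intro j
      rw [hst']
      by_cases hx : x ≠ 0
      · simp only [hx, ne_eq, not_false_eq_true, if_pos]
        rw [PySem.List.pySetD_natCast, PySem.List.pyGetD_natCast]
        by_cases hj : j = s
        · subst hj
          simp [List.getD, hslt]
        · simp [List.getD, Ne.symm hj, hj]
      · simp at hx
        simp [hx]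
    have hcast : (s : Int) + 1 = ((s + 1 : Nat) : Int) := by push_cast; ring
    rw [hcast]
    obtain ⟨ihlen, ihget⟩ := ih (s + 1) st' (by rw [hlen']; simp at hs ⊢; omega)
    refine ⟨by rw [ihlen, hlen'], fun j => ?_⟩
    rw [ihget j, hget' j]
    by_cases hj : j = s
    · subst hj
      have hno : ¬ (j + 1 ≤ j ∧ j < j + 1 + xs.length ∧ xs.getD (j - (j + 1)) 0 ≠ 0) := by omega
      rw [if_neg hno]
      by_cases hx : x ≠ 0
      · rw [if_pos ⟨rfl, hx⟩, if_pos ⟨le_refl j, by simp, by simpa using hx⟩]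
        simp
      · rw [if_neg (by tauto), if_neg (by simp at hx ⊢; omega)]
    · rw [if_neg (by tauto)]
      by_cases hj2 : s + 1 ≤ j
      · obtain ⟨k, rfl⟩ : ∃ k, j = s + 1 + k := ⟨j - (s + 1), by omega⟩
        have e1 : s + 1 + k - (s + 1) = k := by omega
        have e2 : s + 1 + k - s = k + 1 := by omega
        have e3 : (x :: xs).getD (k + 1) 0 = xs.getD k 0 := by simp [List.getD]
        rw [e1, e2, e3]
        by_cases hcond : s + 1 + k < s + 1 + xs.length ∧ xs.getD k 0 ≠ 0
        · rw [if_pos ⟨by omega, hcond.1, hcond.2⟩,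
             if_pos ⟨by omega, by simp; omega, hcond.2⟩]
        · rw [if_neg (by simp at hcond ⊢; omega), if_neg (by simp at hcond ⊢; omega)]
      · rw [if_neg (by omega), if_neg (by omega)]

theorem aBuild (rows : List (List Int)) (init : List (List Int))
    (hw : ∀ r ∈ rows, r.length ≤ init.length) :
    (rows.reverse.foldl aBuildRow init).length = init.length ∧
    ∀ j : Nat, (rows.reverse.foldl aBuildRow init).getD j [] =
      init.getD j [] ++ ((colOf rows j).filter (fun x => x ≠ 0)).reverse := by
  rw [List.foldl_reverse]
  induction rows generalizing init with
  | nil => simp [colOf]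
  | cons r rest ih =>
    rw [List.foldr_cons]
    obtain ⟨ihlen, ihget⟩ := ih init (fun q hq => hw q (List.mem_cons_of_mem _ hq))
    have hr : r.length ≤ (List.foldr (fun x acc => aBuildRow acc x) init rest).length := by
      rw [ihlen]; exact hw r List.mem_cons_self
    have haux := aBuildRow_aux r 0 (List.foldr (fun x acc => aBuildRow acc x) init rest)
      (by omega)
    simp only [Nat.cast_zero, Nat.sub_zero, Nat.zero_add, Nat.zero_le, true_and] at haux
    refine ⟨?_, fun j => ?_⟩
    · rw [aBuildRow, haux.1, ihlen]
    · rw [aBuildRow, haux.2 j, ihget j]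
      have hcol : colOf (r :: rest) j = r.getD j 0 :: colOf rest j := by simp [colOf]
      rw [hcol, List.filter_cons]
      by_cases hz : r.getD j 0 ≠ 0
      · have hb : j < r.length := by
          by_contra hlt
          simp at hlt
          rw [List.getD_eq_default _ _ (by omega)] at hz
          simp at hz
        rw [if_pos ⟨hb, by simpa using hz⟩, if_pos (by simpa using hz)]
        simp
      · simp at hz
        rw [if_neg (by simp [hz]), if_neg (by simp [hz])]
        simp

theorem bScan_spec (board : List (List Int)) (c : Int) (j : Nat)
    (hj : ∀ t : Nat, t < board.length →
      PySem.List.pyGetD (PySem.List.pyGetD board (t : Int) []) c 0 = (colOf board j).getD t 0)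
    (fuel t : Nat) (ht : t ≤ board.length) (hfuel : board.length ≤ t + fuel) :
    ∃ t' : Nat, bScan board c (t : Int) fuel = (t' : Int) ∧ t ≤ t' ∧ t' ≤ board.length ∧
      (∀ r : Nat, t ≤ r → r < t' → (colOf board j).getD r 0 = 0) ∧
      (t' < board.length → (colOf board j).getD t' 0 ≠ 0) := by
  induction fuel generalizing t with
  | zero =>
    refine ⟨t, rfl, le_refl t, ht, fun r hr hr' => by omega, fun h => by omega⟩
  | succ fuel ih =>
    rw [bScan]
    by_cases hcond : (t : Int) < (board.length : Int) ∧
        PySem.List.pyGetD (PySem.List.pyGetD board (t : Int) []) c 0 = 0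
    · rw [if_pos hcond]
      have htl : t < board.length := by exact_mod_cast hcond.1
      have hz : (colOf board j).getD t 0 = 0 := by rw [← hj t htl]; exact hcond.2
      have : ((t : Int) + 1) = ((t + 1 : Nat) : Int) := by push_cast; ring
      rw [this]
      obtain ⟨t', e1, e2, e3, e4, e5⟩ := ih (t + 1) (by omega) (by omega)
      exact ⟨t', e1, by omega, e3,
        fun r hr hr' => by rcases Nat.eq_or_lt_of_le hr with h | h
                           · subst h; exact hz
                           · exact e4 r h hr', e5⟩
    · rw [if_neg hcond]
      refine ⟨t, rfl, le_refl t, ht, fun r hr hr' => by omega, fun h => ?_⟩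
      intro h0
      exact hcond ⟨by exact_mod_cast h, by rw [hj t h]; exact h0⟩

theorem cell_bridge (board : List (List Int)) (w : Nat)
    (hrect : ∀ row ∈ board, row.length = w) (c : Int)
    (h1 : -(w : Int) ≤ c) (h2 : c < w) (t : Nat) (ht : t < board.length) :
    PySem.List.pyGetD (PySem.List.pyGetD board (t : Int) []) c 0 =
      (colOf board (normIdx c w)).getD t 0 := by
  have hb : PySem.List.pyGetD board (t : Int) [] = board[t] := by
    rw [pyGetD_norm board _ _ (by omega) (by exact_mod_cast ht)]
    simp [normIdx, List.getElem?_eq_getElem ht]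
  have hrow : board[t].length = w := hrect _ (List.getElem_mem ht)
  rw [hb, pyGetD_norm board[t] c 0 (by rw [hrow]; exact h1) (by rw [hrow]; exact_mod_cast h2), hrow]
  have hj : normIdx c w < board[t].length := by rw [hrow]; exact normIdx_lt w c h1 h2
  rw [List.getD_eq_getElem _ 0 hj]
  simp [colOf, List.getD, List.getElem?_eq_getElem ht, List.getElem?_eq_getElem hj]

theorem filter_drop_of_zeros (l : List Int) (t t' : Nat) (h1 : t ≤ t') (h2 : t' ≤ l.length)
    (hz : ∀ r : Nat, t ≤ r → r < t' → l.getD r 0 = 0) :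
    (l.drop t).filter (fun x => x ≠ 0) = (l.drop t').filter (fun x => x ≠ 0) := by
  induction t' with
  | zero => have : t = 0 := by omega
            subst this; rfl
  | succ u ih =>
    rcases Nat.eq_or_lt_of_le h1 with he | hlt
    · subst he; rfl
    · have ht : t ≤ u := by omega
      have hu : u < l.length := by omega
      rw [ih ht (by omega) (fun r hr hr' => hz r hr (by omega))]
      rw [List.drop_eq_getElem_cons hu, List.filter_cons_of_neg]
      have h0 : l.getD u 0 = 0 := hz u ht (by omega)
      rw [List.getD_eq_getElem l 0 hu] at h0
      simp [h0]

theorem filter_drop_cons (l : List Int) (t' : Nat) (h : t' < l.length)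
    (hnz : l.getD t' 0 ≠ 0) :
    (l.drop t').filter (fun x => x ≠ 0) =
      l.getD t' 0 :: (l.drop (t' + 1)).filter (fun x => x ≠ 0) := by
  rw [List.getD_eq_getElem l 0 h] at hnz ⊢
  rw [List.drop_eq_getElem_cons h, List.filter_cons_of_pos (by simpa using hnz)]

-- the simulation relation between A's state and B's state
def SimRel (board : List (List Int)) (w : Nat)
    (a : List (List Int) × List Int × Int) (b : List Int × List Int × Int) : Prop :=
  a.2 = b.2 ∧ a.1.length = w ∧ b.1.length = w ∧
  ∀ j : Nat, j < w → ∃ t : Nat, b.1.getD j 0 = (t : Int) ∧ t ≤ board.length ∧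
    a.1.getD j [] = (((colOf board j).drop t).filter (fun x => x ≠ 0)).reverse

theorem getD_set_self {α : Type} (l : List α) (i : Nat) (v d : α) (h : i < l.length) :
    (l.set i v).getD i d = v := by
  simp [List.getD, h]

theorem getD_set_other {α : Type} (l : List α) (i k : Nat) (v d : α) (h : i ≠ k) :
    (l.set i v).getD k d = l.getD k d := by
  simp [List.getD, h]

theorem step_rel (board : List (List Int)) (w : Nat)
    (hrect : ∀ row ∈ board, row.length = w) (m : Int)
    (hm1 : 1 - (w : Int) ≤ m) (hm2 : m ≤ (w : Int))
    (a : List (List Int) × List Int × Int) (b : List Int × List Int × Int)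
    (hR : SimRel board w a b) : SimRel board w (aStep a m) (bStep board b m) := by
  obtain ⟨sts, bk, ex⟩ := a
  obtain ⟨top, bk', ex'⟩ := b
  obtain ⟨hbe, hal, hbl, hcols⟩ := hR
  simp only at hbe hal hbl hcols
  injection hbe with hbk hex
  subst hbk; subst hex
  have hw0 : 0 < w := by omega
  have hc1 : -(w : Int) ≤ m - 1 := by omega
  have hc2 : m - 1 < (w : Int) := by omega
  have hjlt : normIdx (m - 1) w < w := normIdx_lt w _ hc1 hc2
  set j := normIdx (m - 1) w with hjdef
  obtain ⟨t, htop, htle, hstk⟩ := hcols j hjlt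
  have hgs : PySem.List.pyGetD sts (m - 1) [] = sts.getD j [] := by
    rw [pyGetD_norm sts _ _ (by simp [hal]; omega) (by simp [hal]; omega), hal]
  have hss : ∀ v, PySem.List.pySetD sts (m - 1) v = sts.set j v := fun v => by
    rw [pySetD_norm sts _ _ (by simp [hal]; omega) (by simp [hal]; omega), hal]
  have hgt : PySem.List.pyGetD top (m - 1) 0 = (t : Int) := by
    rw [pyGetD_norm top _ _ (by simp [hbl]; omega) (by simp [hbl]; omega), hbl, htop]
  have hts : ∀ v, PySem.List.pySetD top (m - 1) v = top.set j v := fun v => by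
    rw [pySetD_norm top _ _ (by simp [hbl]; omega) (by simp [hbl]; omega), hbl]
  have hcl : (colOf board j).length = board.length := by simp [colOf]
  obtain ⟨t', e1, e2, e3, e4, e5⟩ := bScan_spec board (m - 1) j
    (fun u hu => cell_bridge board w hrect (m - 1) hc1 hc2 u hu) board.length t htle (by omega)
  have hfd := filter_drop_of_zeros (colOf board j) t t' e2 (by omega) e4
  simp only [aStep, bStep]
  rw [hgs, hgt, e1]
  simp only [hss, hts]
  by_cases ht' : t' < board.length
  · have hnz := e5 ht'
    have hsplit := filter_drop_cons (colOf board j) t' (by omega) hnz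
    have hstk' : sts.getD j [] =
        (((colOf board j).drop (t' + 1)).filter (fun x => x ≠ 0)).reverse ++
          [(colOf board j).getD t' 0] := by
      rw [hstk, hfd, hsplit, List.reverse_cons]
    have hpickB : PySem.List.pyGetD (PySem.List.pyGetD board ((t' : Nat) : Int) []) (m - 1) 0 =
        (colOf board j).getD t' 0 :=
      cell_bridge board w hrect (m - 1) hc1 hc2 t' ht'
    rw [hstk', if_pos (by exact_mod_cast ht'), List.getLast?_concat, List.dropLast_concat, hpickB]
    have hrel : ∀ bk2 : List Int, ∀ ex2 : Int, SimRel board w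
        (sts.set j (((colOf board j).drop (t' + 1)).filter (fun x => x ≠ 0)).reverse, bk2, ex2)
        (top.set j ((t' : Int) + 1), bk2, ex2) := by
      intro bk2 ex2
      refine ⟨rfl, by simp [hal], by simp [hbl], fun q hq => ?_⟩
      by_cases hqj : q = j
      · subst hqj
        refine ⟨t' + 1, ?_, by omega, ?_⟩
        · rw [getD_set_self top j _ _ (by omega)]; push_cast; ring
        · rw [getD_set_self sts j _ _ (by omega)]
      · obtain ⟨u, hu1, hu2, hu3⟩ := hcols q hq
        exact ⟨u, by rw [getD_set_other top j q _ _ (Ne.symm hqj)]; exact hu1, hu2,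
          by rw [getD_set_other sts j q _ _ (Ne.symm hqj)]; exact hu3⟩
    cases bk.getLast? with
    | none => exact hrel _ _
    | some bb =>
      show SimRel board w
        (if bb = (colOf board j).getD t' 0 then _ else _)
        (if bb = (colOf board j).getD t' 0 then _ else _)
      split_ifs <;> exact hrel _ _
  · have ht'' : t' = board.length := by omega
    have hemp : sts.getD j [] = [] := by
      rw [hstk, hfd, ht'', ← hcl, List.drop_length]; rfl
    rw [hemp, if_neg (by exact_mod_cast ht')]
    simp only [List.getLast?_nil]
    refine ⟨rfl, by simp [hal], by simp [hbl], fun q hq => ?_⟩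
    by_cases hqj : q = j
    · subst hqj
      refine ⟨t', ?_, by omega, ?_⟩
      · rw [getD_set_self top j _ _ (by omega)]
      · rw [hemp, ht'', ← hcl, List.drop_length]; rfl
    · obtain ⟨u, hu1, hu2, hu3⟩ := hcols q hq
      exact ⟨u, by rw [getD_set_other top j q _ _ (Ne.symm hqj)]; exact hu1, hu2, hu3⟩

theorem fold_rel (board : List (List Int)) (w : Nat)
    (hrect : ∀ row ∈ board, row.length = w) (moves : List Int)
    (hmv : ∀ m ∈ moves, 1 - (w : Int) ≤ m ∧ m ≤ (w : Int))
    (a : List (List Int) × List Int × Int) (b : List Int × List Int × Int)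
    (hR : SimRel board w a b) :
    SimRel board w (moves.foldl aStep a) (moves.foldl (bStep board) b) := by
  induction moves generalizing a b with
  | nil => exact hR
  | cons m rest ih =>
    exact ih (fun x hx => hmv x (List.mem_cons_of_mem _ hx)) _ _
      (step_rel board w hrect m (hmv m (List.mem_cons_self)).1 (hmv m (List.mem_cons_self)).2 a b hR)

-- ===== VERDICT (by name: the statement is the Claim_ definition above) =====
theorem solution_spec : Claim_equal_solution := by
  intro board moves hdom hpre
  obtain ⟨hne, hrect, hmv⟩ := hpre
  unfold Spec_solution solution solution_alt
  have hhead : PySem.List.pyGetD board 0 [] = board.headI := by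
    cases board with
    | nil => exact absurd rfl hne
    | cons r rest =>
      rw [show (0 : Int) = ((0 : Nat) : Int) from rfl, PySem.List.pyGetD_natCast]
      rfl
  rw [hhead, PySem.List.slice?_none_none_neg_one]
  simp only [Option.getD_some]
  obtain ⟨hblen, hbget⟩ := aBuild board
    (List.replicate board.headI.length ([] : List Int))
    (fun r hr => by rw [List.length_replicate, hrect r hr])
  have hrel0 : SimRel board board.headI.length
      (board.reverse.foldl aBuildRow (List.replicate board.headI.length ([] : List Int)),
        ([] : List Int), (0 : Int))
      (List.replicate board.headI.length (0 : Int), ([] : List Int), (0 : Int)) := by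
    refine ⟨rfl, by rw [hblen, List.length_replicate], by rw [List.length_replicate],
      fun j hj => ⟨0, by simp, by omega, ?_⟩⟩
    rw [hbget j]
    simp
  have hfin := fold_rel board board.headI.length hrect moves hmv _ _ hrel0
  exact congrArg Prod.snd hfin.1
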